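-- pv_equiv track=rewrite | github.com/JiIJu/algorithm_algorithm | 학사 지이주/2025/03/0301/택배상자.py | solution
-- ===== SOURCE A (Python) =====
-- def solution(order):
--     answer = 0
--     data = []
--     for i in range(1,len(order)+1):
--         data.append(i)
--         while data and data[-1] == order[answer]:
--             data.pop()
--             answer+=1
--
--
--     return answer
-- ===== SOURCE B (Python) =====
-- def solution(order):
--     boxes = list(range(len(order), 0, -1))  # pile of boxes; next box to load is on top (at the end)
--     stack = []
--     count = 0
--     for target in order:
--         while boxes and (not stack or stack[-1] != target):
--             stack.append(boxes.pop())
--         if stack and stack[-1] == target: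
--             stack.pop()
--             count += 1
--         else:
--             break
--     return count
-- ===== Notes on version B (the rewrite author's own statement) =====
-- stated objective: alternative
-- what changed: Loop nesting is flipped: instead of pushing all boxes 1..n and greedily draining the stack after each push, B walks the order list target by target, loading boxes from a pre-built pile onto the stack only on demand until the target surfaces, and breaks as soon as a target is unreachable.
import Mathlib
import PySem

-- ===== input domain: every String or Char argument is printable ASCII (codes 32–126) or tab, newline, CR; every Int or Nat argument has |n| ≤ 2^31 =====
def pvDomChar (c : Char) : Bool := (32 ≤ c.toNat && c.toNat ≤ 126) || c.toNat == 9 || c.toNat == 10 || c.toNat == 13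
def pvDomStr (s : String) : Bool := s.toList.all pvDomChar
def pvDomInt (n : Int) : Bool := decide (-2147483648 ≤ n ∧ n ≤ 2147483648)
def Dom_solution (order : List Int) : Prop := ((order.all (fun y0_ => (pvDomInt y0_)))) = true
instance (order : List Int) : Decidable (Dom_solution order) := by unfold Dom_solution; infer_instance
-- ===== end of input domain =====

-- B flips the loop nesting: it walks the order list target by target, loading boxes from a
-- pre-built pile only on demand, instead of pushing all boxes 1..n and draining after each push.

-- ===== PORT A =====
-- A's inner `while data and data[-1] == order[answer]` loop; the stack `data` is represented
-- reversed (head = `data[-1]`, the push/pop end).  `order[answer]` is ported as pyGet?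
-- (IndexError = none; the mismatch branch is then taken, which is unreachable in A's actual
-- states: when answer = len(order) the stack is empty).
def popA (order : List Int) : List Int → Int → (List Int × Int)
  | [], ans => ([], ans)
  | t :: rest, ans =>
    if PySem.List.pyGet? order ans = some t then popA order rest (ans + 1)
    else (t :: rest, ans)

def solution (order : List Int) : Int :=
  ((PySem.List.pyRange 1 ((order.length : Int) + 1) 1).foldl
    (fun st i => popA order (i :: st.1) st.2) (([] : List Int), (0 : Int))).2

-- ===== PORT B =====
-- B's inner `while boxes and (not stack or stack[-1] != target)` loop; both Python lists
-- `boxes` and `stack` are used only at their tail end (`boxes.pop()`, `stack[-1]`,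
-- `stack.append`), so each is represented reversed: head = that end.
def pushB (target : Int) : List Int → List Int → List Int × List Int
  | [], stack => ([], stack)
  | b :: bs, stack =>
    if stack.head? ≠ some target then pushB target bs (b :: stack)
    else (b :: bs, stack)

-- B's `for target in order` loop with its `break`; `stack and stack[-1] == target` is
-- `head? = some target` on the reversed representation, `stack.pop()` is `tail`.
def outerB : List Int → List Int → Int → List Int → Int
  | _, _, count, [] => count
  | boxes, stack, count, t :: os =>
    let p := pushB t boxes stack
    if p.2.head? = some t then outerB p.1 p.2.tail (count + 1) os else count

def solution_alt (order : List Int) : Int :=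
  outerB (PySem.List.pyRange (order.length : Int) 0 (-1)).reverse [] 0 order

-- ===== PRECONDITION & SPEC =====
def Spec_solution (order : List Int) (out : Int) : Prop := out = solution_alt order
instance (order : List Int) (out : Int) : Decidable (Spec_solution order out) := by unfold Spec_solution; infer_instance

-- ===== CLAIM (what is proved, stated in full; the proofs are below) =====
def Claim_equal_solution : Prop := ∀ (order : List Int), Dom_solution order → Spec_solution order (solution order)

-- ===== LEMMAS AND PROOFS =====

-- "saturated": A's inner while-loop cannot fire from this state.
def Sat (order : List Int) (stack : List Int) (ans : Int) : Prop :=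
  ∀ t, stack.head? = some t → PySem.List.pyGet? order ans ≠ some t

lemma drop_toNat_cases (order : List Int) (ans : Int) (h : 0 ≤ ans) :
    (order.drop ans.toNat = [] ∧ PySem.List.pyGet? order ans = none) ∨
    (∃ t os', order.drop ans.toNat = t :: os' ∧ PySem.List.pyGet? order ans = some t) := by
  rw [PySem.List.pyGet?_of_nonneg order h]
  have key : order[ans.toNat]? = (order.drop ans.toNat)[0]? := by
    rw [List.getElem?_drop, Nat.add_zero]
  rcases hd : order.drop ans.toNat with _ | ⟨t, os'⟩
  · left
    refine ⟨rfl, ?_⟩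
    rw [key, hd]
    rfl
  · right
    refine ⟨t, os', rfl, ?_⟩
    rw [key, hd]
    rfl

lemma pyGet?_of_drop (order : List Int) (ans t : Int) (os' : List Int) (h : 0 ≤ ans)
    (hd : order.drop ans.toNat = t :: os') : PySem.List.pyGet? order ans = some t := by
  rcases drop_toNat_cases order ans h with ⟨hnil, _⟩ | ⟨t', os'', hd', hg⟩
  · rw [hnil] at hd
    exact absurd hd (by simp)
  · rw [hd'] at hd
    injection hd with h1 _
    rw [hg, h1]

-- the accumulator of B's outer loop is additive.
lemma outerB_acc : ∀ (os boxes stack : List Int) (c : Int),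
    outerB boxes stack c os = c + outerB boxes stack 0 os := by
  intro os
  induction os with
  | nil => intro boxes stack c; simp [outerB]
  | cons t os ih =>
    intro boxes stack c
    simp only [outerB]
    by_cases hc : (pushB t boxes stack).2.head? = some t
    · rw [if_pos hc, if_pos hc, ih _ _ (c + 1), ih _ _ (0 + 1)]
      omega
    · rw [if_neg hc, if_neg hc]
      omega

-- popping a matched target leaves the pile alone and counts one.
lemma F_pop (boxes rest os' : List Int) (t : Int) :
    outerB boxes (t :: rest) 0 (t :: os') = 1 + outerB boxes rest 0 os' := by
  have hp : pushB t boxes (t :: rest) = (boxes, t :: rest) := by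
    rcases boxes with _ | ⟨b, bs⟩
    · rfl
    · rw [pushB]; simp
  have h1 : outerB boxes (t :: rest) 0 (t :: os') = outerB boxes rest 1 os' := by
    simp [outerB, hp]
  rw [h1, outerB_acc os' boxes rest 1]

-- with an empty pile and a non-matching (or empty) stack top, B counts nothing more.
lemma F_zero (stack os : List Int)
    (h : ∀ t os', os = t :: os' → stack.head? ≠ some t) :
    outerB [] stack 0 os = 0 := by
  rcases os with _ | ⟨t, os'⟩
  · rfl
  · have hp : pushB t [] stack = ([], stack) := rfl
    have hne : stack.head? ≠ some t := h t os' rfl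
    simp [outerB, hp, hne]

-- moving the next box from the pile to the stack is invisible to B when the top mismatches.
lemma F_push (c : Int) (boxes stack os : List Int)
    (h : ∀ t os', os = t :: os' → stack.head? ≠ some t) :
    outerB (c :: boxes) stack 0 os = outerB boxes (c :: stack) 0 os := by
  rcases os with _ | ⟨t, os'⟩
  · rfl
  · have hp : pushB t (c :: boxes) stack = pushB t boxes (c :: stack) := by
      rw [pushB]
      simp [h t os' rfl]
    simp only [outerB, hp]

-- A's pop loop drains exactly what B's outer loop pops, one element at a time.
lemma pop_f (order : List Int) : ∀ (stack : List Int) (ans : Int), 0 ≤ ans →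
    0 ≤ (popA order stack ans).2 ∧
    Sat order (popA order stack ans).1 (popA order stack ans).2 ∧
    ∀ boxes, ans + outerB boxes stack 0 (order.drop ans.toNat) =
      (popA order stack ans).2 +
        outerB boxes (popA order stack ans).1 0 (order.drop (popA order stack ans).2.toNat) := by
  intro stack
  induction stack with
  | nil =>
    intro ans h
    refine ⟨h, ?_, fun boxes => rfl⟩
    intro t ht
    simp [popA] at ht
  | cons t rest ih =>
    intro ans h
    by_cases hg : PySem.List.pyGet? order ans = some t
    · have hrec := ih (ans + 1) (by omega)
      have hpop : popA order (t :: rest) ans = popA order rest (ans + 1) := by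
        rw [popA]; simp [hg]
      rw [hpop]
      refine ⟨hrec.1, hrec.2.1, fun boxes => ?_⟩
      have hd : order.drop ans.toNat = t :: order.drop (ans + 1).toNat := by
        rcases drop_toNat_cases order ans h with ⟨_, hnone⟩ | ⟨t', os', hdd, hg'⟩
        · rw [hnone] at hg; exact absurd hg (by simp)
        · rw [hg] at hg'
          have ht' : t' = t := by injection hg'; omega
          subst ht'
          rw [hdd]
          congr 1
          have : (ans + 1).toNat = ans.toNat + 1 := by omega
          rw [this, ← List.drop_drop, hdd]
          rfl
      rw [hd, F_pop]
      have := hrec.2.2 boxes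
      omega
    · have hpop : popA order (t :: rest) ans = (t :: rest, ans) := by
        rw [popA]; simp [hg]
      rw [hpop]
      refine ⟨h, ?_, fun boxes => rfl⟩
      intro t' ht' hg'
      simp at ht'
      subst ht'
      exact hg hg'

-- a saturated state justifies the hypothesis of F_zero / F_push.
lemma sat_mismatch (order stack : List Int) (ans : Int) (hans : 0 ≤ ans)
    (hsat : Sat order stack ans) :
    ∀ t os', order.drop ans.toNat = t :: os' → stack.head? ≠ some t := by
  intro t os' hd hh
  exact hsat t hh (pyGet?_of_drop order ans t os' hans hd)

-- A's outer for-loop from push value `cur`, in a saturated state, computes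
-- ans plus what B's outer loop counts with the remaining pile.
lemma A_loop (order : List Int) (n : Int) (hn : n = (order.length : Int)) :
    ∀ (m : Nat) (cur : Int), (n + 1 - cur).toNat ≤ m →
    ∀ (stack : List Int) (ans : Int), 0 ≤ ans → Sat order stack ans →
    ((PySem.List.pyRange cur (n + 1) 1).foldl
      (fun st i => popA order (i :: st.1) st.2) (stack, ans)).2 =
      ans + outerB (PySem.List.pyRange cur (n + 1) 1) stack 0 (order.drop ans.toNat) := by
  intro m
  induction m with
  | zero =>
    intro cur hm stack ans hans hsat
    have hge : n + 1 ≤ cur := by omega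
    rw [PySem.List.pyRange_one_eq_nil hge]
    simp only [List.foldl_nil]
    rw [F_zero stack _ (sat_mismatch order stack ans hans hsat)]
    omega
  | succ m ih =>
    intro cur hm stack ans hans hsat
    by_cases hlt : cur < n + 1
    · rw [PySem.List.pyRange_one_cons hlt]
      simp only [List.foldl_cons]
      have hp := pop_f order (cur :: stack) ans hans
      set p := popA order (cur :: stack) ans with hpdef
      have hfold : (PySem.List.pyRange (cur + 1) (n + 1) 1).foldl
          (fun st i => popA order (i :: st.1) st.2) p =
          (PySem.List.pyRange (cur + 1) (n + 1) 1).foldl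
          (fun st i => popA order (i :: st.1) st.2) (p.1, p.2) := by
        congr
      rw [hfold, ih (cur + 1) (by omega) p.1 p.2 hp.1 hp.2.1]
      have heq := hp.2.2 (PySem.List.pyRange (cur + 1) (n + 1) 1)
      rw [F_push cur (PySem.List.pyRange (cur + 1) (n + 1) 1) stack _
        (sat_mismatch order stack ans hans hsat)]
      omega
    · have hge : n + 1 ≤ cur := by omega
      rw [PySem.List.pyRange_one_eq_nil hge]
      simp only [List.foldl_nil]
      rw [F_zero stack _ (sat_mismatch order stack ans hans hsat)]
      omega

-- B's reversed pile is the ascending range 1..n.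
lemma boxes_eq (n : Int) :
    (PySem.List.pyRange n 0 (-1)).reverse = PySem.List.pyRange 1 (n + 1) 1 := by
  rw [PySem.List.pyRange_neg_one_eq_reverse]
  simp

-- ===== VERDICT (by name: the statement is the Claim_ definition above) =====
theorem solution_spec : Claim_equal_solution := by
  intro order _
  unfold Spec_solution solution solution_alt
  have hA := A_loop order (order.length : Int) rfl (order.length + 1) 1
    (by omega) [] 0 (le_refl 0) (by intro t ht; exact absurd ht (by simp))
  rw [hA, boxes_eq]
  simp
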